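/-
  jsmn: FROM BYTES TO THE FIELD-BY-FIELD RELATION (the converse of Prog/Jsmn/EncodeAt.lean). A memory file is made of bytes; the contracts
  (Prog/Jsmn/Specs.lean) speak of `ParserAt` and `TokensAt`. Where the bytes `Jsmn.le32 x` lie, a 4-byte read gives `u32 x`; hence
      the 12 bytes `parserBytes p` at `pa`                     →  ParserAt μ pa p        (p's fields must fit 32 bits: `Inv` says so)
      the bytes `ts.flatMap (Token.bytes cfg)` at `tb`         →  TokensAt cfg μ tb ts   (every token must fit: `Token.Fits cfg`)
  and conversely every token array that IS in memory fits (`TokensAt.fits`) — so the state a run leaves can be put into the next run's file.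
-/
import Prog.Jsmn.EncodeAt
import Prog.Inflate.Inst4Image

namespace X86
namespace J6
open X86.User (CodeAt RegsKept Span FlagsOK Layout toNat_add_ofNat toNat_ofNat_lt' add_ofNat_add)
open Jsmn Inst4

set_option linter.unusedVariables false

/-- The four bytes `le32 x`, read back. -/
theorem readLE4_of_le32 {μ : User.Mem} {a : Word} {x : Int} (h : CodeAt μ a (le32 x)) : μ.readLE a 4 = u32 x := by
  have h1 := readLE_of_codeAt h
  have hu := u32_lt x
  rw [le32_length] at h1
  rw [h1]
  simp only [le32, leVal, UInt8.toNat_ofNat']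
  omega

/-- The 12 bytes of a `jsmn_parser`. -/
def parserBytes (p : Parser) : List UInt8 := le32 p.pos ++ (le32 p.toknext ++ le32 p.toksuper)

theorem parserBytes_length (p : Parser) : (parserBytes p).length = 12 := rfl

/-- **The parser struct, from its bytes.** -/
theorem parserAt_of_bytes {μ : User.Mem} {pa : Word} {p : Parser} (h : CodeAt μ pa (parserBytes p)) (hpos : p.pos < 4294967296)
    (htn : p.toknext < 4294967296) (hs : -2147483648 ≤ p.toksuper ∧ p.toksuper < 2147483648) : ParserAt μ pa p := by
  unfold parserBytes at h
  obtain ⟨h0, h⟩ := CodeAt.split h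
  obtain ⟨h1, h2⟩ := CodeAt.split h
  have e4 : pa + UInt64.ofNat (le32 (p.pos : Int)).length = pa + 4 := rfl
  have e8 : pa + 4 + UInt64.ofNat (le32 (p.toknext : Int)).length = pa + 8 := by rw [UInt64.add_assoc]; rfl
  rw [e4] at h1 h2
  rw [e8] at h2
  refine ⟨?_, ?_, ⟨readLE4_of_le32 h2, hs.1, hs.2⟩⟩
  · rw [readLE4_of_le32 h0]; unfold u32; omega
  · rw [readLE4_of_le32 h1]; unfold u32; omega

/-- A token whose fields are what 32-bit memory words can hold (`parent` only where it exists). -/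
structure Token.Fits (cfg : Jsmn.Config) (t : Token) : Prop where
  type : t.type < 4294967296
  start : -2147483648 ≤ t.start ∧ t.start < 2147483648
  «end» : -2147483648 ≤ t.«end» ∧ t.«end» < 2147483648
  size : -2147483648 ≤ t.size ∧ t.size < 2147483648
  parent : cfg.parentLinks = true → -2147483648 ≤ t.parent ∧ t.parent < 2147483648

/-- A token that is in memory fits. -/
theorem TokAt.fits {cfg : Jsmn.Config} {μ : User.Mem} {a : Word} {t : Token} (h : TokAt cfg μ a t) : Token.Fits cfg t :=
  ⟨by rw [← h.type]; exact User.Mem.readLE4_lt _ _, ⟨h.start.2.1, h.start.2.2⟩, ⟨h.«end».2.1, h.«end».2.2⟩, ⟨h.size.2.1, h.size.2.2⟩,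
    fun hl => ⟨(h.parent hl).2.1, (h.parent hl).2.2⟩⟩

/-- Every token of an array that is in memory fits. -/
theorem TokensAt.fits {cfg : Jsmn.Config} {μ : User.Mem} {tb : Word} {ts : Tokens} (h : TokensAt cfg μ tb ts) : ∀ t ∈ ts, Token.Fits cfg t := by
  intro t ht
  obtain ⟨i, hi, rfl⟩ := List.getElem_of_mem ht
  exact (h i hi).fits

/-- **One token, from its bytes.** -/
theorem tokAt_of_bytes {cfg : Jsmn.Config} {μ : User.Mem} {a : Word} {t : Token} (h : CodeAt μ a (Token.bytes cfg t)) (hf : Token.Fits cfg t) :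
    TokAt cfg μ a t := by
  unfold Token.bytes at h
  obtain ⟨h4, hp⟩ := CodeAt.split h
  obtain ⟨h3, hsz⟩ := CodeAt.split h4
  obtain ⟨h2, hen⟩ := CodeAt.split h3
  obtain ⟨hty, hst⟩ := CodeAt.split h2
  simp only [List.length_append, le32_length] at hp hsz hen hst
  have e4 : a + UInt64.ofNat 4 = a + 4 := rfl
  have e8 : a + UInt64.ofNat (4 + 4) = a + 8 := rfl
  have e12 : a + UInt64.ofNat (4 + 4 + 4) = a + 12 := rfl
  have e16 : a + UInt64.ofNat (4 + 4 + 4 + 4) = a + 16 := rfl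
  rw [e4] at hst; rw [e8] at hen; rw [e12] at hsz; rw [e16] at hp
  refine ⟨?_, ⟨readLE4_of_le32 hst, hf.start.1, hf.start.2⟩, ⟨readLE4_of_le32 hen, hf.«end».1, hf.«end».2⟩,
    ⟨readLE4_of_le32 hsz, hf.size.1, hf.size.2⟩, fun hl => ?_⟩
  · rw [readLE4_of_le32 hty]; have := hf.type; unfold u32; omega
  · rw [hl, if_pos rfl] at hp
    exact ⟨readLE4_of_le32 hp, (hf.parent hl).1, (hf.parent hl).2⟩

/-- **The token array, from its bytes.** -/
theorem tokensAt_of_bytes {cfg : Jsmn.Config} {μ : User.Mem} {tb : Word} {ts : Tokens} (h : CodeAt μ tb (ts.flatMap (Token.bytes cfg)))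
    (hf : ∀ t ∈ ts, Token.Fits cfg t) : TokensAt cfg μ tb ts := by
  intro i hi
  have e : ts.flatMap (Token.bytes cfg) = (ts.take i).flatMap (Token.bytes cfg) ++ (Token.bytes cfg ts[i] ++ (ts.drop (i + 1)).flatMap (Token.bytes cfg)) := by
    have e0 : ts = ts.take i ++ (ts[i] :: ts.drop (i + 1)) := by
      rw [← List.drop_eq_getElem_cons hi, List.take_append_drop]
    conv => lhs; rw [e0]
    rw [List.flatMap_append, List.flatMap_cons]
  rw [e] at h
  obtain ⟨_, h2⟩ := CodeAt.split h
  obtain ⟨h3, _⟩ := CodeAt.split h2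
  rw [flatMap_take_length cfg ts i (by omega)] at h3
  exact tokAt_of_bytes h3 (hf _ (List.getElem_mem hi))

end J6
end X86
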